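/- GENERATED by mk_final_copies.py from the proof of the farm's unit `stb_vorbis_get_frame_float.2` (farm:stb_vorbis_get_frame_float.2.1: Lemmas.lean) as the
   re-elaboration sweep compiled it — do not edit. -/
import Asan.CheckWalk
import Vorbis.Spec.Units.stb_vorbis_get_frame_float_2

open X86 X86.User Asan Vorbis Vorbis.Spec

namespace Vorbis.Spec.stb_vorbis_get_frame_float_2

/-- `mov ebp, eax` with `eax = 0`: the register is the word 0. -/
theorem seg2_ofBV_zero (x : BitVec 32) (h : x.toNat = 0) : Word.ofBV x = UInt64.ofNat 0 := by
  have e : x = 0#32 := BitVec.eq_of_toNat_eq h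
  subst e
  rfl

/-- A 32-bit load `mov r32, [slot]` of the number `n`: its signed value is the field vocabulary's `sint32 n`. -/
theorem seg2_s32_load (n : Nat) (hn : n < 2 ^ 32) : s32 (Word.ofBV (BitVec.ofNat 32 n)) = sint32 n := by
  show (Word.part .w32 (Word.ofBV (BitVec.ofNat 32 n))).toInt = sint32 n
  rw [Word.part_w32_ofBV32]
  exact toInt_ofNat32 n hn

/-- The branch `test eax, eax ; jne` taken: the signed value of eax is not 0. -/
theorem seg2_s32_ne (w : Word) (h : ¬ (Word.part .w32 w).toNat = 0) : s32 w ≠ 0 := by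
  intro h0
  apply h
  have e : Word.part .w32 w = 0#32 := BitVec.toInt_inj.mp h0
  rw [e]
  rfl

/-- A non-negative `int` result in a zero-extended register is below `2 ^ 31` and is its own signed value. -/
theorem seg2_rax_small (w : Word) (h32 : w.toNat < 2 ^ 32) (h0 : 0 ≤ s32 w) : w.toNat < 2 ^ 31 ∧ s32 w = (w.toNat : Int) := by
  have e := s32_eq_argInt w
  rw [e] at h0 ⊢
  rw [argInt_def] at h0 ⊢
  rw [Nat.mod_eq_of_lt h32] at h0 ⊢
  have hc := sint32_cases w.toNat
  omega

/-- An `int` object at the number `n` is read by the machine at the word `a` with `a.toNat = n`. -/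
theorem seg2_i32_slot (m : Mem) (a : Word) (n : Nat) (ha : a.toNat = n) : m.i32 n = sint32 (m.readLE a 4) := by
  unfold Mem.i32 Mem.u32
  rw [eq_addr a n ha]

/-- **What vorbis_finish_frame's result is under W3′**: non-negative, and `left + r ≤ blocksize_1`
(`FinishPre.result`: `r = 0` or `r = min(right, len) − left`). -/
theorem seg2_result {b1 pl ln lf rt r : Int} (hfp : FinishPre b1 ln lf rt) (hres : Top.FinishResult pl ln lf rt r) :
    0 ≤ r ∧ lf + r ≤ b1 := by
  have h1 := hfp.result
  have h2 := hfp.left_nonneg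
  have h3 := hfp.left_half
  obtain ⟨_, h0 | hm⟩ := hres
  · omega
  · rw [hm]
    generalize (if ln < rt then ln else rt) = x at *
    omega

end Vorbis.Spec.stb_vorbis_get_frame_float_2
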